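-- pv_equiv track=rewrite | github.com/Paolo-Vicencio/Algorithms-Work | CS4102/HW#7/daycare.py | room_sorting
-- ===== SOURCE A (Python) =====
-- def room_sorting(rooms):
--     # setting up the 3 different categories to save the rooms in
--     extraSpace = []
--     sameSpace = []
--     loseSpace = []
--
--     # sifting through all rooms and placing them in proper category
--     for each in rooms:
--         if each[0] - each[1] < 0:
--             extraSpace.append(each)
--         elif each[0] - each[1] == 0:
--             sameSpace.append(each)
--         elif each[0] - each[1] > 0:
--             loseSpace.append(each)
--
--     # sort the extra space rooms least to greatest by before value
--     extraSpace.sort()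
--     # sort the same space rooms greatest to least
--     sameSpace.sort(reverse=True)
--     # sort the lost space rooms greatest to least
--     loseSpace.sort(key=lambda point:point[1], reverse=True)
--
--     finalList = extraSpace + sameSpace + loseSpace
--
--     return finalList
-- ===== SOURCE B (Python) =====
-- def room_sorting(rooms):
--     # LSD-radix style: three stable whole-list passes (tertiary, secondary,
--     # then category) replace A's three buckets with three separate sorts.
--     def cat(r):
--         d = r[0] - r[1]
--         return 0 if d < 0 else (1 if d == 0 else 2)
--
--     def k3(r):
--         return r[1] if cat(r) == 0 else 0
--
--     def k2(r):
--         c = cat(r)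
--         return r[0] if c == 0 else (-r[0] if c == 1 else -r[1])
--
--     out = sorted(rooms, key=k3)
--     out = sorted(out, key=k2)
--     return sorted(out, key=cat)
-- ===== Notes on version B (the rewrite author's own statement) =====
-- stated objective: alternative
-- what changed: A partitions rooms into three buckets, sorts each bucket with its own key/reverse mode and concatenates; B never partitions: it runs three stable whole-list sorts (LSD-radix style) by a tertiary, a secondary and finally the category key, letting stability reproduce each group's internal order.
import Mathlib
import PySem

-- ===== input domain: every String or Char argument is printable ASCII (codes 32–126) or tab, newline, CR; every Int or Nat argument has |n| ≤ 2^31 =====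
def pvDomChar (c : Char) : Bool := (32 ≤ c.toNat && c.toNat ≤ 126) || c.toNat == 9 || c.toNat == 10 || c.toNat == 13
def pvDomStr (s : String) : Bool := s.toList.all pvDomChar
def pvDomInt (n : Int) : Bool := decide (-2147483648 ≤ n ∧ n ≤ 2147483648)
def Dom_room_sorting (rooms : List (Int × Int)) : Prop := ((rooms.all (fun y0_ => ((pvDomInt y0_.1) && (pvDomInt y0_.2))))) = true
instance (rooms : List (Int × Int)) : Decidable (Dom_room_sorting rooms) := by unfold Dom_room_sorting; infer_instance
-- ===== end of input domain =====

-- B replaces A's three buckets with three separately-keyed sorts by three stable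
-- whole-list sorts (LSD-radix style: tertiary, secondary, then category key).


-- ===== PORT A =====
-- the for-loop appending into the three category lists, as a fold over the triple of lists
def pvBuckets (rooms : List (Int × Int)) :
    List (Int × Int) × List (Int × Int) × List (Int × Int) :=
  rooms.foldl
    (fun st each =>
      if each.1 - each.2 < 0 then (st.1 ++ [each], st.2.1, st.2.2)
      else if each.1 - each.2 = 0 then (st.1, st.2.1 ++ [each], st.2.2)
      else if each.1 - each.2 > 0 then (st.1, st.2.1, st.2.2 ++ [each])
      else st)
    ([], [], [])

-- extraSpace.sort() / sameSpace.sort(reverse=True) sort tuples lexicographically;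
-- loseSpace.sort(key=lambda point: point[1], reverse=True)
def room_sorting (rooms : List (Int × Int)) : List (Int × Int) :=
  PySem.List.sorted2 (pvBuckets rooms).1 (fun p => p.1) (fun p => p.2) false
  ++ PySem.List.sorted2 (pvBuckets rooms).2.1 (fun p => p.1) (fun p => p.2) true
  ++ PySem.List.sorted (pvBuckets rooms).2.2 (fun p => p.2) true

-- ===== PORT B =====
def pvCat (r : Int × Int) : Int :=
  if r.1 - r.2 < 0 then 0 else if r.1 - r.2 = 0 then 1 else 2

def pvK3 (r : Int × Int) : Int := if pvCat r = 0 then r.2 else 0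

def pvK2 (r : Int × Int) : Int :=
  if pvCat r = 0 then r.1 else if pvCat r = 1 then -r.1 else -r.2

def room_sorting_alt (rooms : List (Int × Int)) : List (Int × Int) :=
  PySem.List.sorted
    (PySem.List.sorted (PySem.List.sorted rooms pvK3 false) pvK2 false)
    pvCat false

-- ===== PRECONDITION & SPEC =====
def Spec_room_sorting (rooms : List (Int × Int)) (out : List (Int × Int)) : Prop := out = room_sorting_alt rooms
instance (rooms : List (Int × Int)) (out : List (Int × Int)) : Decidable (Spec_room_sorting rooms out) := by unfold Spec_room_sorting; infer_instance

-- ===== CLAIM (what is proved, stated in full; the proofs are below) =====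
def Claim_equal_room_sorting : Prop := ∀ (rooms : List (Int × Int)), Dom_room_sorting rooms → Spec_room_sorting rooms (room_sorting rooms)

-- ===== LEMMAS AND PROOFS =====

theorem insertBy_cons {α : Type} (b : α → α → Bool) (x y : α) (ys : List α) :
    PySem.List.insertBy b x (y :: ys) =
      if b x y then x :: y :: ys else y :: PySem.List.insertBy b x ys := rfl

theorem insertBy_congr_mem' {α : Type} (bA bB : α → α → Bool) (x : α) (ys : List α)
    (h : ∀ y ∈ ys, bA x y = bB x y) :
    PySem.List.insertBy bA x ys = PySem.List.insertBy bB x ys := by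
  induction ys with
  | nil => rfl
  | cons y ys ih =>
    rw [insertBy_cons, insertBy_cons, h y (by simp)]
    split_ifs with hb
    · rfl
    · rw [ih (fun z hz => h z (by simp [hz]))]

theorem sortedB_congr' {α : Type} (bA bB : α → α → Bool) (xs : List α)
    (h : ∀ x ∈ xs, ∀ y ∈ xs, bA x y = bB x y) :
    xs.foldl (fun acc x => PySem.List.insertBy bA x acc) [] =
    xs.foldl (fun acc x => PySem.List.insertBy bB x acc) [] := by
  suffices H : ∀ (l acc : List α), (∀ x ∈ l, ∀ y ∈ l, bA x y = bB x y) →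
      (∀ x ∈ l, ∀ y ∈ acc, bA x y = bB x y) →
      l.foldl (fun acc x => PySem.List.insertBy bA x acc) acc =
      l.foldl (fun acc x => PySem.List.insertBy bB x acc) acc by
    exact H xs [] h (by simp)
  intro l
  induction l with
  | nil => intro acc _ _; rfl
  | cons x l ih =>
    intro acc h1 h2
    simp only [List.foldl_cons]
    rw [insertBy_congr_mem' bA bB x acc (fun y hy => h2 x (by simp) y hy)]
    apply ih
    · exact fun a ha y hy => h1 a (by simp [ha]) y (by simp [hy])
    · intro a ha y hy
      rcases (PySem.List.mem_insertBy bB x y acc).1 hy with rfl | hy'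
      · exact h1 a (by simp [ha]) y (by simp)
      · exact h2 a (by simp [ha]) y hy'

theorem insertBy_append_left' {α : Type} (b : α → α → Bool) (x : α) (l r : List α)
    (h : ∀ y ∈ r, b x y = true) :
    PySem.List.insertBy b x (l ++ r) = PySem.List.insertBy b x l ++ r := by
  induction l with
  | nil =>
    cases r with
    | nil => rfl
    | cons y ys => simp [insertBy_cons, h y (by simp)]; rfl
  | cons y l ih =>
    rw [List.cons_append, insertBy_cons, insertBy_cons]
    split_ifs <;> simp [ih]

theorem insertBy_append_right' {α : Type} (b : α → α → Bool) (x : α) (l r : List α)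
    (h : ∀ y ∈ l, b x y = false) :
    PySem.List.insertBy b x (l ++ r) = l ++ PySem.List.insertBy b x r := by
  induction l with
  | nil => rfl
  | cons y l ih =>
    rw [List.cons_append, insertBy_cons, h y (by simp)]
    simp only [Bool.false_eq_true, if_false, List.cons_append]
    rw [ih (fun z hz => h z (by simp [hz]))]

theorem insertBy_nilX {α : Type} (b : α → α → Bool) (x : α) :
    PySem.List.insertBy b x [] = [x] := rfl

def sortedB {α : Type} (b : α → α → Bool) (xs : List α) : List α :=
  xs.foldl (fun acc x => PySem.List.insertBy b x acc) []

theorem sorted_eq_sortedB {α : Type} (xs : List α) (k : α → Int) :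
    PySem.List.sorted xs k false = sortedB (fun a b => decide (k a < k b)) xs :=
  PySem.List.sorted_eq_foldl_insertBy xs k

theorem sorted_rev_eq_sortedB {α : Type} (xs : List α) (k : α → Int) :
    PySem.List.sorted xs k true = sortedB (fun a b => decide (k b < k a)) xs :=
  PySem.List.sorted_rev_eq_foldl_insertBy xs k

theorem sorted2_eq_sortedB {α : Type} (xs : List α) (k1 k2 : α → Int) :
    PySem.List.sorted2 xs k1 k2 false =
      sortedB (fun a b => decide (k1 a < k1 b) || (!decide (k1 b < k1 a) && decide (k2 a < k2 b))) xs := rfl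

theorem sorted2_rev_eq_sortedB {α : Type} (xs : List α) (k1 k2 : α → Int) :
    PySem.List.sorted2 xs k1 k2 true =
      sortedB (fun a b => decide (k1 b < k1 a) || (!decide (k1 a < k1 b) && decide (k2 b < k2 a))) xs := rfl

theorem forall_mem_append_singleton {α : Type} {P : α → Prop} {l : List α} {x : α}
    (hl : ∀ y ∈ l, P y) (hx : P x) : ∀ y ∈ l ++ [x], P y := by
  intro y hy
  rcases List.mem_append.1 hy with hy | hy
  · exact hl y hy
  · simp at hy; subst hy; exact hx

-- three-valued key: stable sort = concatenation of the filters

theorem sorted_three_valued' {α : Type} (k : α → Int) (zs : List α)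
    (h : ∀ x ∈ zs, k x = 0 ∨ k x = 1 ∨ k x = 2) :
    PySem.List.sorted zs k false =
      zs.filter (fun x => k x == 0) ++ zs.filter (fun x => k x == 1)
        ++ zs.filter (fun x => k x == 2) := by
  rw [sorted_eq_sortedB]
  suffices H : ∀ (l a0 a1 a2 : List α), (∀ y ∈ a0, k y = 0) → (∀ y ∈ a1, k y = 1) →
      (∀ y ∈ a2, k y = 2) → (∀ x ∈ l, k x = 0 ∨ k x = 1 ∨ k x = 2) →
      l.foldl (fun acc x => PySem.List.insertBy (fun a b => decide (k a < k b)) x acc)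
          (a0 ++ a1 ++ a2) =
        (a0 ++ l.filter (fun x => k x == 0)) ++ (a1 ++ l.filter (fun x => k x == 1))
          ++ (a2 ++ l.filter (fun x => k x == 2)) by
    have := H zs [] [] [] (by simp) (by simp) (by simp) h
    simpa [sortedB] using this
  intro l
  induction l with
  | nil => intro a0 a1 a2 _ _ _ _; simp
  | cons x l ih =>
    intro a0 a1 a2 h0 h1 h2 hl
    simp only [List.foldl_cons]
    rcases hl x (by simp) with hx | hx | hx
    · rw [show a0 ++ a1 ++ a2 = a0 ++ (a1 ++ a2) by simp,
        insertBy_append_left' _ x a0 (a1 ++ a2) (by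
          intro y hy; rcases List.mem_append.1 hy with hy | hy
          · simp [h1 y hy, hx]
          · simp [h2 y hy, hx]),
        PySem.List.insertBy_of_forall_not_before _ x a0 (by intro y hy; simp [h0 y hy, hx]),
        show (a0 ++ [x]) ++ (a1 ++ a2) = (a0 ++ [x]) ++ a1 ++ a2 by simp]
      rw [ih (a0 ++ [x]) a1 a2 (forall_mem_append_singleton h0 hx) h1 h2
            (fun z hz => hl z (by simp [hz]))]
      simp [hx]
    · rw [show a0 ++ a1 ++ a2 = (a0 ++ a1) ++ a2 by simp,
        insertBy_append_left' _ x (a0 ++ a1) a2 (by intro y hy; simp [h2 y hy, hx]),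
        insertBy_append_right' _ x a0 a1 (by intro y hy; simp [h0 y hy, hx]),
        PySem.List.insertBy_of_forall_not_before _ x a1 (by intro y hy; simp [h1 y hy, hx])]
      rw [show a0 ++ (a1 ++ [x]) ++ a2 = a0 ++ (a1 ++ [x]) ++ a2 from rfl]
      rw [ih a0 (a1 ++ [x]) a2 h0 (forall_mem_append_singleton h1 hx) h2
            (fun z hz => hl z (by simp [hz]))]
      simp [hx]
    · rw [insertBy_append_right' _ x (a0 ++ a1) a2 (by
          intro y hy; rcases List.mem_append.1 hy with hy | hy
          · simp [h0 y hy, hx]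
          · simp [h1 y hy, hx]),
        PySem.List.insertBy_of_forall_not_before _ x a2 (by intro y hy; simp [h2 y hy, hx])]
      rw [show a0 ++ a1 ++ (a2 ++ [x]) = a0 ++ a1 ++ (a2 ++ [x]) from rfl]
      rw [ih a0 a1 (a2 ++ [x]) h0 h1 (forall_mem_append_singleton h2 hx)
            (fun z hz => hl z (by simp [hz]))]
      simp [hx]

theorem insertBy_all_before {α : Type} (b : α → α → Bool) (x : α) (l : List α)
    (h : ∀ z ∈ l, b x z = true) : PySem.List.insertBy b x l = x :: l := by
  cases l with
  | nil => rfl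
  | cons y ys => rw [insertBy_cons, if_pos (h y (by simp))]

theorem insertBy_pairwise {α : Type} (k : α → Int) (x : α) (acc : List α)
    (h : acc.Pairwise (fun a b => k a ≤ k b)) :
    (PySem.List.insertBy (fun a b => decide (k a < k b)) x acc).Pairwise
      (fun a b => k a ≤ k b) := by
  induction acc with
  | nil => simp [insertBy_nilX]
  | cons y ys ih =>
    rw [insertBy_cons]
    rcases List.pairwise_cons.1 h with ⟨hy, hys⟩
    split_ifs with hb
    · simp only [decide_eq_true_eq] at hb
      refine List.pairwise_cons.2 ⟨?_, h⟩
      intro z hz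
      rcases List.mem_cons.1 hz with rfl | hz
      · omega
      · have := hy z hz; omega
    · simp only [decide_eq_true_eq, not_lt] at hb
      refine List.pairwise_cons.2 ⟨?_, ih hys⟩
      intro z hz
      rcases (PySem.List.mem_insertBy _ x z ys).1 hz with rfl | hz
      · exact hb
      · exact hy z hz

theorem filter_insertBy {α : Type} (k : α → Int) (p : α → Bool) (x : α) (acc : List α)
    (h : acc.Pairwise (fun a b => k a ≤ k b)) :
    (PySem.List.insertBy (fun a b => decide (k a < k b)) x acc).filter p =
      if p x then PySem.List.insertBy (fun a b => decide (k a < k b)) x (acc.filter p)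
      else acc.filter p := by
  induction acc with
  | nil =>
    rw [insertBy_nilX]
    by_cases hx : p x <;> simp [hx, insertBy_nilX]
  | cons y ys ih =>
    rcases List.pairwise_cons.1 h with ⟨hy, hys⟩
    rw [insertBy_cons]
    by_cases hb : k x < k y
    · rw [if_pos (by simpa using hb)]
      by_cases hx : p x
      · rw [if_pos hx, List.filter_cons, if_pos hx]
        refine (insertBy_all_before _ x _ ?_).symm
        intro z hz
        have hz' := List.mem_of_mem_filter hz
        simp only [decide_eq_true_eq]
        rcases List.mem_cons.1 hz' with rfl | hz''
        · exact hb
        · have := hy z hz''; omega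
      · rw [if_neg hx, List.filter_cons, if_neg hx]
    · rw [if_neg (by simpa using hb), List.filter_cons]
      by_cases hpy : p y
      · rw [if_pos hpy, List.filter_cons, if_pos hpy, ih hys]
        by_cases hx : p x
        · rw [if_pos hx, if_pos hx, insertBy_cons, if_neg (by simpa using hb)]
        · rw [if_neg hx, if_neg hx]
      · rw [if_neg hpy, List.filter_cons, if_neg hpy, ih hys]


theorem sorted_filter' {α : Type} (k : α → Int) (p : α → Bool) (xs : List α) :
    (PySem.List.sorted xs k false).filter p =
      PySem.List.sorted (xs.filter p) k false := by
  rw [sorted_eq_sortedB, sorted_eq_sortedB]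
  suffices H : ∀ (l acc : List α), acc.Pairwise (fun a b => k a ≤ k b) →
      (l.foldl (fun acc x => PySem.List.insertBy (fun a b => decide (k a < k b)) x acc)
        acc).filter p =
      (l.filter p).foldl
        (fun acc x => PySem.List.insertBy (fun a b => decide (k a < k b)) x acc)
        (acc.filter p) by
    simpa [sortedB] using H xs [] (by simp)
  intro l
  induction l with
  | nil => intro acc _; rfl
  | cons x l ih =>
    intro acc hacc
    simp only [List.foldl_cons, List.filter_cons]
    rw [ih _ (insertBy_pairwise k x acc hacc), filter_insertBy k p x acc hacc]
    by_cases hx : p x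
    · rw [if_pos hx, if_pos hx, List.foldl_cons]
    · rw [if_neg hx, if_neg hx]

-- commuting a primary insertion past a lexicographic insertion (radix step)

theorem insert_commute {α : Type} (k1 k2 : α → Int) (x z : α) (hxz : k2 x < k2 z)
    (N : List α) :
    PySem.List.insertBy (fun a b => decide (k1 a < k1 b)) z
      (PySem.List.insertBy
        (fun a b => decide (k1 a < k1 b) || (!decide (k1 b < k1 a) && decide (k2 a < k2 b))) x N) =
    PySem.List.insertBy
      (fun a b => decide (k1 a < k1 b) || (!decide (k1 b < k1 a) && decide (k2 a < k2 b))) x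
      (PySem.List.insertBy (fun a b => decide (k1 a < k1 b)) z N) := by
  induction N with
  | nil =>
    rw [insertBy_nilX, insertBy_nilX, insertBy_cons, insertBy_cons]
    split_ifs with h1 h2 h2 <;>
      simp only [Bool.or_eq_true, Bool.and_eq_true, Bool.not_eq_true', decide_eq_true_eq,
        decide_eq_false_iff_not] at h1 h2 <;> first | rfl | (exfalso; omega)
  | cons y N ih =>
    rw [insertBy_cons, insertBy_cons]
    by_cases hxy : (decide (k1 x < k1 y) || (!decide (k1 y < k1 x) && decide (k2 x < k2 y))) = true
    · rw [if_pos hxy, insertBy_cons, insertBy_cons]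
      by_cases hzx : k1 z < k1 x
      · have hzy : k1 z < k1 y := by
          simp only [Bool.or_eq_true, Bool.and_eq_true, Bool.not_eq_true', decide_eq_true_eq,
            decide_eq_false_iff_not] at hxy
          omega
        rw [if_pos (by simpa using hzx), if_pos (by simpa using hzy), insertBy_cons,
          if_neg (by simp only [Bool.or_eq_true, Bool.and_eq_true, Bool.not_eq_true',
            decide_eq_true_eq, decide_eq_false_iff_not]; omega),
          insertBy_cons, if_pos hxy]
      · rw [if_neg (by simpa using hzx)]
        split_ifs with hzy
        · rw [insertBy_cons, if_pos (by
            simp only [Bool.or_eq_true, Bool.and_eq_true, Bool.not_eq_true',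
              decide_eq_true_eq, decide_eq_false_iff_not]
            omega)]
        · rw [insertBy_cons, if_pos hxy]
    · rw [if_neg hxy]
      have hxy' : ¬(k1 x < k1 y ∨ (¬(k1 y < k1 x) ∧ k2 x < k2 y)) := by
        simpa only [Bool.or_eq_true, Bool.and_eq_true, Bool.not_eq_true',
          decide_eq_true_eq, decide_eq_false_iff_not] using hxy
      by_cases hzy : k1 z < k1 y
      · have hlexxz :
            ¬((decide (k1 x < k1 z) || (!decide (k1 z < k1 x) && decide (k2 x < k2 z))) = true) := by
          simp only [Bool.or_eq_true, Bool.and_eq_true, Bool.not_eq_true',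
            decide_eq_true_eq, decide_eq_false_iff_not]
          omega
        rw [insertBy_cons (fun a b => decide (k1 a < k1 b)) z y
            (PySem.List.insertBy _ x N), if_pos (by simpa using hzy),
          if_pos (show decide (k1 z < k1 y) = true by simpa using hzy),
          insertBy_cons _ x z (y :: N), if_neg hlexxz,
          insertBy_cons _ x y N, if_neg hxy]
      · rw [insertBy_cons (fun a b => decide (k1 a < k1 b)) z y
            (PySem.List.insertBy _ x N), if_neg (by simpa using hzy),
          if_neg (show ¬(decide (k1 z < k1 y) = true) by simpa using hzy),
          insertBy_cons _ x y (PySem.List.insertBy _ z N), if_neg hxy, ih]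

theorem sorted_insert_k2 {α : Type} (k1 k2 : α → Int) (x : α) (M : List α)
    (hM : M.Pairwise (fun a b => k2 a ≤ k2 b)) :
    PySem.List.sorted (PySem.List.insertBy (fun a b => decide (k2 a < k2 b)) x M) k1 false =
      PySem.List.insertBy
        (fun a b => decide (k1 a < k1 b) || (!decide (k1 b < k1 a) && decide (k2 a < k2 b))) x
        (PySem.List.sorted M k1 false) := by
  induction M using List.reverseRecOn with
  | nil => rfl
  | append_singleton M'' z ih =>
    rcases List.pairwise_append.1 hM with ⟨hM'', _, hcross⟩
    by_cases hzx : k2 z ≤ k2 x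
    · rw [PySem.List.insertBy_of_forall_not_before _ x (M'' ++ [z]) (by
        intro y hy
        rcases List.mem_append.1 hy with hy | hy
        · have := hcross y hy z (by simp); simp only [decide_eq_false_iff_not, not_lt]; omega
        · simp at hy; subst hy; simp only [decide_eq_false_iff_not, not_lt]; omega)]
      rw [PySem.List.sorted_eq_foldl_insertBy, List.foldl_append, List.foldl_cons,
        List.foldl_nil, ← PySem.List.sorted_eq_foldl_insertBy]
      refine insertBy_congr_mem' _ _ x _ ?_
      intro y hy
      have hyM : y ∈ M'' ++ [z] := (PySem.List.mem_sorted _ _ _ _).1 hy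
      have hk2 : k2 y ≤ k2 x := by
        rcases List.mem_append.1 hyM with hy' | hy'
        · have := hcross y hy' z (by simp); omega
        · simp at hy'; subst hy'; omega
      have : decide (k2 x < k2 y) = false := by simp only [decide_eq_false_iff_not, not_lt]; omega
      rw [this]
      simp
    · replace hzx : k2 x < k2 z := by omega
      rw [insertBy_append_left' _ x M'' [z] (by
        intro y hy; simp at hy; subst hy; simpa using hzx)]
      rw [show PySem.List.sorted (M'' ++ [z]) k1 false =
          PySem.List.insertBy (fun a b => decide (k1 a < k1 b)) z
            (PySem.List.sorted M'' k1 false) by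
        rw [PySem.List.sorted_eq_foldl_insertBy, PySem.List.sorted_eq_foldl_insertBy,
          List.foldl_append, List.foldl_cons, List.foldl_nil]]
      rw [show PySem.List.sorted
            (PySem.List.insertBy (fun a b => decide (k2 a < k2 b)) x M'' ++ [z]) k1 false =
          PySem.List.insertBy (fun a b => decide (k1 a < k1 b)) z
            (PySem.List.sorted
              (PySem.List.insertBy (fun a b => decide (k2 a < k2 b)) x M'') k1 false) by
        rw [PySem.List.sorted_eq_foldl_insertBy, PySem.List.sorted_eq_foldl_insertBy,
          List.foldl_append, List.foldl_cons, List.foldl_nil]]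
      rw [ih hM'', insert_commute k1 k2 x z hzx]

theorem sorted_sorted_eq_lex' {α : Type} (k1 k2 : α → Int) (xs : List α) :
    PySem.List.sorted (PySem.List.sorted xs k2 false) k1 false =
      sortedB (fun a b => decide (k1 a < k1 b) ||
        (!decide (k1 b < k1 a) && decide (k2 a < k2 b))) xs := by
  induction xs using List.reverseRecOn with
  | nil => rfl
  | append_singleton xs x ih =>
    rw [show PySem.List.sorted (xs ++ [x]) k2 false =
        PySem.List.insertBy (fun a b => decide (k2 a < k2 b)) x (PySem.List.sorted xs k2 false) by
      rw [PySem.List.sorted_eq_foldl_insertBy, PySem.List.sorted_eq_foldl_insertBy,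
        List.foldl_append, List.foldl_cons, List.foldl_nil]]
    rw [sorted_insert_k2 k1 k2 x _ (PySem.List.sorted_pairwise xs k2), ih]
    unfold sortedB
    rw [List.foldl_append, List.foldl_cons, List.foldl_nil]

theorem pvBuckets_eq (rooms : List (Int × Int)) :
    pvBuckets rooms =
      (rooms.filter (fun r => pvCat r == 0),
       rooms.filter (fun r => pvCat r == 1),
       rooms.filter (fun r => pvCat r == 2)) := by
  suffices H : ∀ (l : List (Int × Int)) (e s t : List (Int × Int)),
      l.foldl
        (fun st each =>
          if each.1 - each.2 < 0 then (st.1 ++ [each], st.2.1, st.2.2)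
          else if each.1 - each.2 = 0 then (st.1, st.2.1 ++ [each], st.2.2)
          else if each.1 - each.2 > 0 then (st.1, st.2.1, st.2.2 ++ [each])
          else st) (e, s, t) =
      (e ++ l.filter (fun r => pvCat r == 0), s ++ l.filter (fun r => pvCat r == 1),
        t ++ l.filter (fun r => pvCat r == 2)) by
    simpa [pvBuckets] using H rooms [] [] []
  intro l
  induction l with
  | nil => intro e s t; simp
  | cons x l ih =>
    intro e s t
    simp only [List.foldl_cons, List.filter_cons]
    rcases lt_trichotomy (x.1 - x.2) 0 with hx | hx | hx
    · rw [if_pos hx, ih]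
      have hc : pvCat x = 0 := by unfold pvCat; rw [if_pos hx]
      simp [hc]
    · rw [if_neg (by omega), if_pos hx, ih]
      have hc : pvCat x = 1 := by unfold pvCat; rw [if_neg (by omega), if_pos hx]
      simp [hc]
    · rw [if_neg (by omega), if_neg (by omega), if_pos hx, ih]
      have hc : pvCat x = 2 := by unfold pvCat; rw [if_neg (by omega), if_neg (by omega)]
      simp [hc]

theorem pvCat_cases (x : Int × Int) : pvCat x = 0 ∨ pvCat x = 1 ∨ pvCat x = 2 := by
  unfold pvCat; split_ifs <;> simp


theorem pvCat_one {x : Int × Int} (h : pvCat x = 1) : x.1 - x.2 = 0 := by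
  unfold pvCat at h; split_ifs at h <;> omega


theorem pvK3_of_zero {x : Int × Int} (h : pvCat x = 0) : pvK3 x = x.2 := by
  unfold pvK3; rw [if_pos h]

theorem pvK3_of_ne_zero {x : Int × Int} (h : pvCat x ≠ 0) : pvK3 x = 0 := by
  unfold pvK3; rw [if_neg h]

theorem pvK2_of_zero {x : Int × Int} (h : pvCat x = 0) : pvK2 x = x.1 := by
  unfold pvK2; rw [if_pos h]

theorem pvK2_of_one {x : Int × Int} (h : pvCat x = 1) : pvK2 x = -x.1 := by
  unfold pvK2; rw [if_neg (by omega), if_pos h]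

theorem pvK2_of_two {x : Int × Int} (h : pvCat x = 2) : pvK2 x = -x.2 := by
  unfold pvK2; rw [if_neg (by omega), if_neg (by omega)]

-- sorting a list whose members all share one category by pvK3 leaves it unchanged

theorem sorted_pvK3_id (l : List (Int × Int)) (c : Int) (hc : c ≠ 0)
    (h : ∀ x ∈ l, pvCat x = c) :
    PySem.List.sorted l pvK3 false = l := by
  apply PySem.List.sorted_eq_self_of_pairwise
  apply List.pairwise_of_forall_mem_list
  intro a ha b hb
  rw [pvK3_of_ne_zero (by rw [h a ha]; exact hc), pvK3_of_ne_zero (by rw [h b hb]; exact hc)]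

theorem group0_eq (F : List (Int × Int)) (hmem : ∀ x ∈ F, pvCat x = 0) :
    PySem.List.sorted (PySem.List.sorted F pvK3 false) pvK2 false =
      PySem.List.sorted2 F (fun p => p.1) (fun p => p.2) false := by
  rw [show PySem.List.sorted F pvK3 false =
      PySem.List.sorted F (fun r : Int × Int => r.2) false by
    rw [sorted_eq_sortedB, sorted_eq_sortedB]
    apply sortedB_congr'
    intro a ha b hb
    rw [pvK3_of_zero (hmem a ha), pvK3_of_zero (hmem b hb)]]
  rw [show PySem.List.sorted (PySem.List.sorted F (fun r : Int × Int => r.2) false) pvK2 false =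
      PySem.List.sorted (PySem.List.sorted F (fun r : Int × Int => r.2) false)
        (fun r : Int × Int => r.1) false by
    rw [sorted_eq_sortedB (PySem.List.sorted F _ false),
      sorted_eq_sortedB (PySem.List.sorted F _ false)]
    apply sortedB_congr'
    intro a ha b hb
    have ha' : a ∈ F := by rw [PySem.List.mem_sorted] at ha; exact ha
    have hb' : b ∈ F := by rw [PySem.List.mem_sorted] at hb; exact hb
    rw [pvK2_of_zero (hmem a ha'), pvK2_of_zero (hmem b hb')]]
  rw [sorted_sorted_eq_lex', sorted2_eq_sortedB]

theorem group1_eq (F : List (Int × Int)) (hmem : ∀ x ∈ F, pvCat x = 1) :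
    PySem.List.sorted (PySem.List.sorted F pvK3 false) pvK2 false =
      PySem.List.sorted2 F (fun p => p.1) (fun p => p.2) true := by
  rw [sorted_pvK3_id F 1 (by norm_num) hmem, sorted2_rev_eq_sortedB, sorted_eq_sortedB]
  apply sortedB_congr'
  intro a ha b hb
  have ea := pvCat_one (hmem a ha)
  have eb := pvCat_one (hmem b hb)
  rw [pvK2_of_one (hmem a ha), pvK2_of_one (hmem b hb)]
  by_cases h1 : b.1 < a.1
  · simp [h1, show -a.1 < -b.1 by omega, show ¬a.1 < b.1 by omega]
  · by_cases h2 : a.1 < b.1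
    · simp [h2, show ¬(-a.1 < -b.1) by omega, show ¬b.1 < a.1 by omega]
    · simp [h1, h2, show ¬(-a.1 < -b.1) by omega, show ¬b.2 < a.2 by omega]

theorem group2_eq (F : List (Int × Int)) (hmem : ∀ x ∈ F, pvCat x = 2) :
    PySem.List.sorted (PySem.List.sorted F pvK3 false) pvK2 false =
      PySem.List.sorted F (fun p : Int × Int => p.2) true := by
  rw [sorted_pvK3_id F 2 (by norm_num) hmem, sorted_rev_eq_sortedB, sorted_eq_sortedB]
  apply sortedB_congr'
  intro a ha b hb
  rw [pvK2_of_two (hmem a ha), pvK2_of_two (hmem b hb)]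
  exact decide_eq_decide.2 (by omega)

theorem main_eq (rooms : List (Int × Int)) : room_sorting rooms = room_sorting_alt rooms := by
  unfold room_sorting room_sorting_alt
  rw [pvBuckets_eq]
  rw [sorted_three_valued' pvCat _ (fun x _ => pvCat_cases x)]
  rw [sorted_filter' pvK2 (fun x => pvCat x == 0), sorted_filter' pvK3 (fun x => pvCat x == 0),
    sorted_filter' pvK2 (fun x => pvCat x == 1), sorted_filter' pvK3 (fun x => pvCat x == 1),
    sorted_filter' pvK2 (fun x => pvCat x == 2), sorted_filter' pvK3 (fun x => pvCat x == 2)]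
  rw [group0_eq _ (fun x hx => by simpa using (List.mem_filter.1 hx).2),
    group1_eq _ (fun x hx => by simpa using (List.mem_filter.1 hx).2),
    group2_eq _ (fun x hx => by simpa using (List.mem_filter.1 hx).2)]

-- ===== VERDICT (by name: the statement is the Claim_ definition above) =====
theorem room_sorting_spec : Claim_equal_room_sorting := by
  intro rooms _
  unfold Spec_room_sorting
  exact main_eq rooms
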